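-- pv_equiv track=rewrite | github.com/samirhusain26/Scalar | enrich_hollywood.py | make_buckets
-- ===== SOURCE A (Python) =====
-- def make_buckets(values, n_buckets):
--     """Create equal-frequency buckets from a sorted list of numeric values.
--     Returns list of (label, low, high) tuples."""
--     clean = sorted([v for v in values if v is not None])
--     if not clean:
--         return []
--     bucket_size = len(clean) // n_buckets
--     remainder = len(clean) % n_buckets
--     buckets = []
--     idx = 0
--     for i in range(n_buckets):
--         size = bucket_size + (1 if i < remainder else 0)
--         if idx >= len(clean):
--             break
--         low = clean[idx]
--         high = clean[min(idx + size - 1, len(clean) - 1)]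
--         buckets.append((low, high))
--         idx += size
--     return buckets
-- ===== SOURCE B (Python) =====
-- def make_buckets(values, n_buckets):
--     """Create equal-frequency buckets via a precomputed boundary table
--     instead of a running index accumulator."""
--     clean = sorted(v for v in values if v is not None)
--     if not clean:
--         return []
--     n = len(clean)
--     bucket_size, remainder = divmod(n, n_buckets)
--     m = min(n_buckets, n)  # buckets past the n-th would be empty
--     boundaries = [i * bucket_size + min(i, remainder) for i in range(m + 1)]
--     return [(clean[s], clean[e - 1]) for s, e in zip(boundaries, boundaries[1:])]
-- ===== Notes on version B (the rewrite author's own statement) =====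
-- stated objective: alternative
-- what changed: Replaces A's running-index accumulator loop (per-iteration size recomputation and clamped high index) with a precomputed boundary table boundaries[i] = i*bucket_size + min(i, remainder) and a single pairwise pass over zip(boundaries, boundaries[1:]).
import Mathlib
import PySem

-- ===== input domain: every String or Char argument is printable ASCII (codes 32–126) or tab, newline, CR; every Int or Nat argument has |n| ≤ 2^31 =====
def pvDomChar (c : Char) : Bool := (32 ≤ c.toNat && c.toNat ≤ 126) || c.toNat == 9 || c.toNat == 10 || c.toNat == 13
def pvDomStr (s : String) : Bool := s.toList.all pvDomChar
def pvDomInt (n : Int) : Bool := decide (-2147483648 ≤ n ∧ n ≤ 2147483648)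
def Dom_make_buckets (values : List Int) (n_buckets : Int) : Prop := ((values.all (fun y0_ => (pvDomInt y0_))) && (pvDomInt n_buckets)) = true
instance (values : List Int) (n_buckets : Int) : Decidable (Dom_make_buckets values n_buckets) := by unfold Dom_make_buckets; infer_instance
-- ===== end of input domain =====

-- B replaces A's running-index accumulator loop and early break with a precomputed boundary table (capped at min(n_buckets, n)) and a pairwise map (alternative decomposition, same cost).


-- ===== PORT A =====
-- the 'for i in range(n_buckets)' loop with its running index 'idx' and early break;
-- clean[...] is PySem.List.pyGetD: on admitted inputs every index is in range (proved below)
def pvLoopA (clean : List Int) (bucket_size remainder : Int) : List Int → Int → List (Int × Int)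
  | [], _ => []
  | i :: rest, idx =>
    let size := bucket_size + (if i < remainder then 1 else 0)
    if idx ≥ (clean.length : Int) then []
    else
      let low := PySem.List.pyGetD clean idx 0
      let high := PySem.List.pyGetD clean (min (idx + size - 1) ((clean.length : Int) - 1)) 0
      (low, high) :: pvLoopA clean bucket_size remainder rest (idx + size)

def make_buckets (values : List Int) (n_buckets : Int) : List (Int × Int) :=
  -- 'v is not None' is always true for Int values, so the comprehension keeps everything
  let clean := PySem.List.sorted (values.filter (fun _ => true)) id false
  if clean = [] then []
  else
    let bucket_size := PySem.Int.floordiv (clean.length : Int) n_buckets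
    let remainder := PySem.Int.mod (clean.length : Int) n_buckets
    pvLoopA clean bucket_size remainder (PySem.List.pyRange 0 n_buckets 1) 0

-- ===== PORT B =====
def make_buckets_alt (values : List Int) (n_buckets : Int) : List (Int × Int) :=
  let clean := PySem.List.sorted (values.filter (fun _ => true)) id false
  if clean = [] then []
  else
    let n := (clean.length : Int)
    let bucket_size := PySem.Int.floordiv n n_buckets
    let remainder := PySem.Int.mod n n_buckets
    let m := min n_buckets n
    let boundaries := (PySem.List.pyRange 0 (m + 1) 1).map
      (fun i => i * bucket_size + min i remainder)
    (boundaries.zip boundaries.tail).map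
      (fun se => (PySem.List.pyGetD clean se.1 0, PySem.List.pyGetD clean (se.2 - 1) 0))

-- ===== PRECONDITION & SPEC =====
-- Pre_ excludes exactly n_buckets = 0 with a nonempty list, where Python A (and B) raise ZeroDivisionError.
def Pre_make_buckets (values : List Int) (n_buckets : Int) : Prop := values = [] ∨ n_buckets ≠ 0
instance (values : List Int) (n_buckets : Int) : Decidable (Pre_make_buckets values n_buckets) := by unfold Pre_make_buckets; infer_instance
def pvWitness_make_buckets : List Int × Int := ([3, 1, 2, 5, 4], 2)

def Spec_make_buckets (values : List Int) (n_buckets : Int) (out : List (Int × Int)) : Prop := out = make_buckets_alt values n_buckets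
instance (values : List Int) (n_buckets : Int) (out : List (Int × Int)) : Decidable (Spec_make_buckets values n_buckets out) := by unfold Spec_make_buckets; infer_instance

-- ===== CLAIM (what is proved, stated in full; the proofs are below) =====
def Claim_equal_make_buckets : Prop := ∀ (values : List Int) (n_buckets : Int), Dom_make_buckets values n_buckets → Pre_make_buckets values n_buckets → Spec_make_buckets values n_buckets (make_buckets values n_buckets)

-- ===== LEMMAS AND PROOFS =====

-- boundaries strictly below n before the cap m = min nb n
theorem pvBnd_lt (nb bs rem n : Int) (hbs : 0 ≤ bs) (_hrem : 0 ≤ rem) (hremlt : rem < nb)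
    (heq : bs * nb + rem = n) (i : Int) (_hi : 0 ≤ i) (him : i < min nb n) :
    i * bs + min i rem < n := by
  by_cases hbs0 : bs = 0
  · subst hbs0; simp only [mul_zero, zero_mul] at *; omega
  · have h1 : 1 ≤ bs := by omega
    have h2 : (nb - i) * 1 ≤ (nb - i) * bs := by
      exact mul_le_mul_of_nonneg_left h1 (by omega)
    have h3 : (nb - i) * bs = bs * nb - i * bs := by ring
    have h4 : (nb - i) * 1 = nb - i := by ring
    omega

-- boundaries never exceed n up to the cap
theorem pvBnd_le (nb bs rem n : Int) (hbs : 0 ≤ bs) (_hrem : 0 ≤ rem) (hremlt : rem < nb)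
    (heq : bs * nb + rem = n) (j : Int) (_hj : 0 ≤ j) (hjm : j ≤ min nb n) :
    j * bs + min j rem ≤ n := by
  by_cases hbs0 : bs = 0
  · subst hbs0; simp only [mul_zero, zero_mul] at *; omega
  · have h1 : 1 ≤ bs := by omega
    have h2 : (nb - j) * 1 ≤ (nb - j) * bs := by
      exact mul_le_mul_of_nonneg_left h1 (by omega)
    have h3 : (nb - j) * bs = bs * nb - j * bs := by ring
    have h4 : (nb - j) * 1 = nb - j := by ring
    omega

-- the boundary at the cap equals n exactly
theorem pvBnd_m (nb bs rem n : Int) (hbs : 0 ≤ bs) (hrem : 0 ≤ rem) (hremlt : rem < nb)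
    (heq : bs * nb + rem = n) :
    (min nb n) * bs + min (min nb n) rem = n := by
  by_cases hbs0 : bs = 0
  · subst hbs0; simp only [mul_zero, zero_mul] at *; omega
  · have h1 : 1 ≤ bs := by omega
    have h2 : nb * 1 ≤ nb * bs := by
      exact mul_le_mul_of_nonneg_left h1 (by omega)
    have h5 : nb ≤ n := by
      have h3 : nb * bs = bs * nb := by ring
      omega
    have h6 : min nb n = nb := by omega
    rw [h6]
    have h7 : nb * bs = bs * nb := by ring
    omega

-- loop correspondence: at step i, A's running index equals the boundary table value,
-- and A's break never fires before the cap
theorem pvLoop_eq (clean : List Int) (nb bs rem : Int)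
    (hbs : 0 ≤ bs) (hrem : 0 ≤ rem) (hremlt : rem < nb)
    (heq : bs * nb + rem = (clean.length : Int)) :
    ∀ (k : Nat) (i : Int), 0 ≤ i → i + k = min nb (clean.length : Int) →
    pvLoopA clean bs rem (PySem.List.pyRange i nb 1) (i * bs + min i rem)
      = ((((PySem.List.pyRange i (min nb (clean.length : Int) + 1) 1).map
            (fun j => j * bs + min j rem)).zip
          ((PySem.List.pyRange i (min nb (clean.length : Int) + 1) 1).map
            (fun j => j * bs + min j rem)).tail).map
         (fun se => (PySem.List.pyGetD clean se.1 0, PySem.List.pyGetD clean (se.2 - 1) 0))) := by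
  intro k
  induction k with
  | zero =>
    intro i hi hik
    have h2 : PySem.List.pyRange i (min nb (clean.length : Int) + 1) 1 = [i] := by
      have : min nb (clean.length : Int) + 1 = i + 1 := by omega
      rw [this]; exact PySem.List.pyRange_one_singleton i
    rw [h2]
    by_cases hm : i < nb
    · -- cap reached before nb: the boundary equals n, so A breaks
      have h1 : PySem.List.pyRange i nb 1 = i :: PySem.List.pyRange (i + 1) nb 1 :=
        PySem.List.pyRange_one_cons hm
      have hbm := pvBnd_m nb bs rem (clean.length : Int) hbs hrem hremlt heq
      have hieq : i = min nb (clean.length : Int) := by omega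
      rw [← hieq] at hbm
      rw [h1]
      simp only [pvLoopA]
      rw [if_pos (by omega : i * bs + min i rem ≥ (clean.length : Int))]
      simp
    · have h1 : PySem.List.pyRange i nb 1 = [] := PySem.List.pyRange_one_eq_nil (by omega)
      rw [h1]
      simp [pvLoopA]
  | succ k ih =>
    intro i hi hik
    have him : i < min nb (clean.length : Int) := by omega
    have h1 : PySem.List.pyRange i nb 1 = i :: PySem.List.pyRange (i + 1) nb 1 :=
      PySem.List.pyRange_one_cons (by omega)
    have h2 : PySem.List.pyRange i (min nb (clean.length : Int) + 1) 1
        = i :: PySem.List.pyRange (i + 1) (min nb (clean.length : Int) + 1) 1 :=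
      PySem.List.pyRange_one_cons (by omega)
    have h3 : PySem.List.pyRange (i + 1) (min nb (clean.length : Int) + 1) 1
        = (i + 1) :: PySem.List.pyRange ((i + 1) + 1) (min nb (clean.length : Int) + 1) 1 :=
      PySem.List.pyRange_one_cons (by omega)
    have hlt := pvBnd_lt nb bs rem (clean.length : Int) hbs hrem hremlt heq i hi him
    have hle := pvBnd_le nb bs rem (clean.length : Int) hbs hrem hremlt heq (i + 1) (by omega) (by omega)
    -- the step: size added to the index gives the next boundary
    have hstep : i * bs + min i rem + (bs + (if i < rem then 1 else 0))
        = (i + 1) * bs + min (i + 1) rem := by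
      have : (i + 1) * bs = i * bs + bs := by ring
      split_ifs with h <;> omega
    rw [h1, h2]
    simp only [List.map_cons, List.tail_cons]
    rw [h3]
    simp only [List.map_cons, List.zip_cons_cons]
    simp only [pvLoopA]
    rw [if_neg (by omega : ¬ i * bs + min i rem ≥ (clean.length : Int))]
    have hhigh : min (i * bs + min i rem + (bs + (if i < rem then 1 else 0)) - 1)
        ((clean.length : Int) - 1) = (i + 1) * bs + min (i + 1) rem - 1 := by
      rw [hstep]; omega
    rw [hhigh, hstep]
    congr 1
    have hih := ih (i + 1) (by omega) (by omega)
    rw [h3] at hih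
    simpa only [List.map_cons, List.tail_cons] using hih
-- end pvLoop_eq

theorem make_buckets_spec : Claim_equal_make_buckets := by
  intro values n_buckets _ _
  unfold Spec_make_buckets make_buckets make_buckets_alt
  set clean := PySem.List.sorted (values.filter (fun _ => true)) id false with hclean
  by_cases hc : clean = []
  · simp [hc]
  · simp only [if_neg hc]
    by_cases hnb : 0 < n_buckets
    · have hpos : (0:Int) < clean.length := by
        have h0 : 0 < clean.length := List.length_pos_of_ne_nil hc
        exact_mod_cast h0
      have hfd : PySem.Int.floordiv (clean.length : Int) n_buckets = (clean.length : Int) / n_buckets :=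
        PySem.Int.floordiv_eq_ediv_of_pos hnb
      have hmd : PySem.Int.mod (clean.length : Int) n_buckets = (clean.length : Int) % n_buckets :=
        PySem.Int.mod_eq_emod_of_pos hnb
      have hrem0 : (0:Int) ≤ PySem.Int.mod (clean.length : Int) n_buckets := by
        rw [hmd]; exact Int.emod_nonneg _ (by omega)
      have h := pvLoop_eq clean n_buckets
        (PySem.Int.floordiv (clean.length : Int) n_buckets)
        (PySem.Int.mod (clean.length : Int) n_buckets)
        (by rw [hfd]; exact Int.ediv_nonneg (by omega) (by omega))
        hrem0
        (by rw [hmd]; exact Int.emod_lt_of_pos _ hnb)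
        (by rw [hfd, hmd]
            have h4 := Int.mul_ediv_add_emod (clean.length : Int) n_buckets
            have h5 : (clean.length : Int) / n_buckets * n_buckets = n_buckets * ((clean.length : Int) / n_buckets) := by ring
            omega)
        (min n_buckets (clean.length : Int)).toNat 0 (le_refl 0) (by omega)
      rw [min_eq_left hrem0] at h
      simpa using h
    · -- n_buckets ≤ 0: A's range is empty; B's boundary list has at most one entry, so the zip is empty
      have h1 : PySem.List.pyRange 0 n_buckets 1 = [] := PySem.List.pyRange_one_eq_nil (by omega)
      have hm : min n_buckets (clean.length : Int) = n_buckets := by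
        have h0 : 0 < clean.length := List.length_pos_of_ne_nil hc
        have : (0:Int) < clean.length := by exact_mod_cast h0
        omega
      rcases lt_or_eq_of_le (by omega : n_buckets ≤ 0) with hlt | heq0
      · have h2 : PySem.List.pyRange 0 (min n_buckets (clean.length : Int) + 1) 1 = [] := by
          rw [hm]; exact PySem.List.pyRange_one_eq_nil (by omega)
        rw [h1, h2]; simp [pvLoopA]
      · subst heq0
        rw [h1, hm]
        rw [show PySem.List.pyRange 0 (0 + 1) 1 = [0] from PySem.List.pyRange_one_singleton 0]
        simp [pvLoopA]
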